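-- pv_equiv track=rewrite | github.com/dsc-sangmyung/CodingTest | Paul/Level1/MBTI_Test.py | solution
-- ===== SOURCE A (Python) =====
-- def solution(survey, choices):
--
--     score_list = [3, 2, 1, 0, 1, 2, 3]
--     result = {"R": 0, "T": 0, "C": 0, "F": 0, "J": 0, "M": 0, "A": 0, "N": 0}
--
--     for i in range(len(survey)):
--
--         temp = list(survey[i])              # 유형 나누기
--         score_index = choices[i] - 1        # 점수 인덱스
--
--         if score_index > 3:
--             result[temp[1]] += score_list[score_index]
--         elif score_index < 3:
--             result[temp[0]] += score_list[score_index]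
--         else:
--             continue
--
--     answer = ''
--
--     if result["R"] >= result["T"]:
--         answer += "R"
--     else:
--         answer += "T"
--
--     if result["C"] >= result["F"]:
--         answer += "C"
--     else:
--         answer += "F"
--
--     if result["J"] >= result["M"]:
--         answer += "J"
--     else:
--         answer += "M"
--
--     if result["A"] >= result["N"]:
--         answer += "A"
--     else:
--         answer += "N"
--
--     return answer
-- ===== SOURCE B (Python) =====
-- def solution(survey, choices):
--     SCORES = [3, 2, 1, 0, 1, 2, 3]  # weight of each choice: distance from the neutral choice 4
--     # Decide each trait slot independently: scan the answers once per pair keeping a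
--     # signed margin -- a choice below 4 credits the question's first letter, above 4
--     # its second; the first letter wins the slot iff the margin is >= 0.
--     def margin(f, s):
--         m = 0
--         for q, c in zip(survey, choices):
--             w = SCORES[c - 1]
--             if w == 0:
--                 continue
--             target = q[0] if c < 4 else q[1]
--             if target == f:
--                 m += w
--             elif target == s:
--                 m -= w
--         return m
--     return "".join(f if margin(f, s) >= 0 else s for f, s in ("RT", "CF", "JM", "AN"))
-- ===== Notes on version B (the rewrite author's own statement) =====
-- stated objective: simpler
-- what changed: Instead of one pass filling a pre-initialised 8-key score dict via a three-way branch on the score index and then four dict comparisons, B decides each trait slot independently: per pair it scans the answers computing one signed margin (a choice below 4 credits the question's first letter, above 4 its second, weighted by its distance from the neutral choice) and picks the first letter iff the margin is >= 0 -- no dict and no branch on the index range. …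
import Mathlib
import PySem

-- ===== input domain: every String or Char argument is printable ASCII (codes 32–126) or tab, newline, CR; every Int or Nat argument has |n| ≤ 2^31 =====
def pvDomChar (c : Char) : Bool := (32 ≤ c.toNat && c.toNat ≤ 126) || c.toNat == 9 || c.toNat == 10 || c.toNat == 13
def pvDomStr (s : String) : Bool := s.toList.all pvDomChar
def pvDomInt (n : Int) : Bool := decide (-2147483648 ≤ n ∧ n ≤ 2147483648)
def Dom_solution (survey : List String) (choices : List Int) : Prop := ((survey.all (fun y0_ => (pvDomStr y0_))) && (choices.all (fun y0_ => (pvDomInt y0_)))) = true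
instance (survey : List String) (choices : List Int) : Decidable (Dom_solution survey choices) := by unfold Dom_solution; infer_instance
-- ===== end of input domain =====

-- B decides each trait slot by its own signed-margin scan over the answers (no score
-- table, no dict of eight tallies); objective: simpler.

-- ===== PORT A =====
-- The body of A's for-loop (score_list, A's local table, is used only here);
-- result[k] += v is Dict.modify k 0 (· + v) — exact under Pre_, where every accessed
-- key is one of the eight initialised keys, which modify preserves.
def pvBodyA (survey : List String) (choices : List Int)
    (result : PySem.Dict String Int) (i : Int) : PySem.Dict String Int :=
  let score_list : List Int := [3, 2, 1, 0, 1, 2, 3]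
  let temp : List Char := (PySem.List.pyGetD survey i "").toList
  let score_index : Int := PySem.List.pyGetD choices i 0 - 1
  if score_index > 3 then
    result.modify (String.singleton (PySem.List.pyGetD temp 1 ' ')) 0
      (· + PySem.List.pyGetD score_list score_index 0)
  else if score_index < 3 then
    result.modify (String.singleton (PySem.List.pyGetD temp 0 ' ')) 0
      (· + PySem.List.pyGetD score_list score_index 0)
  else result

-- str += of letter literals is ported over List Char / String.ofList (exact for ASCII
-- literals); result["R"] etc. is getD "R" 0 — exact, the eight keys are always present.
def solution (survey : List String) (choices : List Int) : String :=
  let result : PySem.Dict String Int :=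
    (PySem.List.pyRange 0 (survey.length : Int) 1).foldl (pvBodyA survey choices)
      (PySem.Dict.ofList [("R", 0), ("T", 0), ("C", 0), ("F", 0), ("J", 0), ("M", 0), ("A", 0), ("N", 0)])
  let answer : List Char := []
  let answer := answer ++ (if result.getD "R" 0 ≥ result.getD "T" 0 then "R" else "T").toList
  let answer := answer ++ (if result.getD "C" 0 ≥ result.getD "F" 0 then "C" else "F").toList
  let answer := answer ++ (if result.getD "J" 0 ≥ result.getD "M" 0 then "J" else "M").toList
  let answer := answer ++ (if result.getD "A" 0 ≥ result.getD "N" 0 then "A" else "N").toList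
  String.ofList answer

-- ===== PORT B =====
-- B's inner 'def margin(f, s)': a fold over zip(survey, choices) keeping the signed
-- margin; SCORES[c - 1] and q[0] / q[1] are pyGetD on the list / the string's chars
-- (exact under Pre_, which keeps the accessed index in Python's accepted range).
def pvMargin (survey : List String) (choices : List Int) (f s : Char) : Int :=
  (survey.zip choices).foldl (fun m qc =>
    let w : Int := PySem.List.pyGetD ([3, 2, 1, 0, 1, 2, 3] : List Int) (qc.2 - 1) 0
    if w = 0 then m
    else
      let target : Char :=
        if qc.2 < 4 then PySem.List.pyGetD qc.1.toList 0 ' '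
        else PySem.List.pyGetD qc.1.toList 1 ' '
      if target = f then m + w else if target = s then m - w else m) 0

-- "".join(f if margin(f, s) >= 0 else s for f, s in ("RT","CF","JM","AN")):
-- the unpacked 1-char strings are String.singleton; join is PySem.Str.join.
def solution_alt (survey : List String) (choices : List Int) : String :=
  PySem.Str.join ""
    (([('R','T'), ('C','F'), ('J','M'), ('A','N')] : List (Char × Char)).map
      (fun p => if pvMargin survey choices p.1 p.2 ≥ 0
                then String.singleton p.1 else String.singleton p.2))

-- ===== PRECONDITION & SPEC =====
def pvLetters : List Char := ['R', 'T', 'C', 'F', 'J', 'M', 'A', 'N']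

-- Pre_ is exactly A's return domain: enough choices, each zipped choice in -6..7 (the
-- score-table indices Python accepts) and the credited letter (first iff choice < 4,
-- second iff choice > 4, none at 4) one of the eight scored letters — outside it A
-- raises KeyError/IndexError.  ('?' ∉ pvLetters, so the getD memberships also force
-- the needed string lengths.)
def Pre_solution (survey : List String) (choices : List Int) : Prop :=
  survey.length ≤ choices.length ∧
  ∀ p ∈ survey.zip choices,
    -6 ≤ p.2 ∧ p.2 ≤ 7 ∧
    (4 < p.2 → p.1.toList.getD 1 '?' ∈ pvLetters) ∧
    (p.2 < 4 → p.1.toList.getD 0 '?' ∈ pvLetters)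
instance (survey : List String) (choices : List Int) : Decidable (Pre_solution survey choices) := by
  unfold Pre_solution; infer_instance

def pvWitness_solution : List String × List Int := (["RT", "CF", "JM", "NA"], [1, 5, 4, 7])

def Spec_solution (survey : List String) (choices : List Int) (out : String) : Prop := out = solution_alt survey choices
instance (survey : List String) (choices : List Int) (out : String) : Decidable (Spec_solution survey choices out) := by unfold Spec_solution; infer_instance

-- ===== CLAIM (what is proved, stated in full; the proofs are below) =====
def Claim_equal_solution : Prop := ∀ (survey : List String) (choices : List Int), Dom_solution survey choices → Pre_solution survey choices → Spec_solution survey choices (solution survey choices)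

-- ===== LEMMAS AND PROOFS =====

theorem pvSing_eq_iff (a b : Char) : String.singleton a = String.singleton b ↔ a = b := by
  constructor
  · intro h
    have := congrArg String.toList h
    simpa [String.singleton] using this
  · intro h; rw [h]

-- A's loop body as a function of the question string and the choice.
def pvStepA (dA : PySem.Dict String Int) (q : String) (c : Int) : PySem.Dict String Int :=
  let score_list : List Int := [3, 2, 1, 0, 1, 2, 3]
  let temp : List Char := q.toList
  let score_index : Int := c - 1
  if score_index > 3 then
    dA.modify (String.singleton (PySem.List.pyGetD temp 1 ' ')) 0
      (· + PySem.List.pyGetD score_list score_index 0)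
  else if score_index < 3 then
    dA.modify (String.singleton (PySem.List.pyGetD temp 0 ' ')) 0
      (· + PySem.List.pyGetD score_list score_index 0)
  else dA

theorem pvBodyA_eq (survey : List String) (choices : List Int) :
    pvBodyA survey choices = fun s i =>
      pvStepA s (PySem.List.pyGetD survey i "") (PySem.List.pyGetD choices i 0) := rfl

-- An index loop 'for i in range(len(xs)): … xs[i] … ys[i] …' over two lists, the first
-- not longer than the second, is the fold over their zip.
theorem pv_foldl_idx_zip {α β σ : Type} (f : σ → α → β → σ) (dx : α) (dy : β)
    (k : Nat) (xs : List α) (ys : List β) (hlen : xs.length ≤ ys.length)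
    (hk : k ≤ xs.length) (init : σ) :
    (PySem.List.pyRange (k : Int) (xs.length : Int) 1).foldl
        (fun s i => f s (PySem.List.pyGetD xs i dx) (PySem.List.pyGetD ys i dy)) init
      = ((xs.drop k).zip (ys.drop k)).foldl (fun s p => f s p.1 p.2) init := by
  induction hn : xs.length - k generalizing k init with
  | zero =>
    have hk' : k = xs.length := by omega
    subst hk'
    rw [PySem.List.pyRange_one_eq_nil (by omega)]
    simp
  | succ n ih =>
    have hklt : k < xs.length := by omega
    rw [PySem.List.pyRange_one_cons (by exact_mod_cast hklt)]
    have hx : PySem.List.pyGetD xs (k : Int) dx = xs[k] := by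
      rw [PySem.List.pyGetD_natCast]; exact List.getD_eq_getElem xs dx hklt
    have hy : PySem.List.pyGetD ys (k : Int) dy = ys[k]'(by omega) := by
      rw [PySem.List.pyGetD_natCast]; exact List.getD_eq_getElem ys dy (by omega)
    have hdx : xs.drop k = xs[k] :: xs.drop (k + 1) := List.drop_eq_getElem_cons hklt
    have hdy : ys.drop k = ys[k]'(by omega) :: ys.drop (k + 1) := List.drop_eq_getElem_cons (by omega)
    rw [hdx, hdy]
    simp only [List.zip_cons_cons, List.foldl_cons, hx, hy]
    have hcast : ((k : Int) + 1) = ((k + 1 : Nat) : Int) := by push_cast; ring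
    rw [hcast]
    apply ih <;> omega

theorem pv_foldl_idx_zip_zero {α β σ : Type} (f : σ → α → β → σ) (dx : α) (dy : β)
    (xs : List α) (ys : List β) (hlen : xs.length ≤ ys.length) (init : σ) :
    (PySem.List.pyRange 0 (xs.length : Int) 1).foldl
        (fun s i => f s (PySem.List.pyGetD xs i dx) (PySem.List.pyGetD ys i dy)) init
      = (xs.zip ys).foldl (fun s p => f s p.1 p.2) init := by
  simpa using pv_foldl_idx_zip f dx dy 0 xs ys hlen (Nat.zero_le _) init

-- A's initial dict reads 0 at every key under default 0.
theorem pvInit_getD (k : String) :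
    (PySem.Dict.ofList [("R", (0 : Int)), ("T", 0), ("C", 0), ("F", 0), ("J", 0), ("M", 0), ("A", 0), ("N", 0)]).getD k 0 = 0 := by
  show (PySem.Dict.mk [("R", (0 : Int)), ("T", 0), ("C", 0), ("F", 0), ("J", 0), ("M", 0), ("A", 0), ("N", 0)]).getD k 0 = 0
  simp only [PySem.Dict.getD_eq_get?_getD, PySem.Dict.get?_mk_cons]
  split_ifs <;> simp [PySem.Dict.get?]

-- One step: B's margin step tracks the difference of A's two tallies (choices 1..7).
theorem pvModify_diff (f s t : Char) (hfs : f ≠ s) (dA : PySem.Dict String Int)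
    (m w : Int) (h : m = dA.getD (String.singleton f) 0 - dA.getD (String.singleton s) 0) :
    (if t = f then m + w else if t = s then m - w else m)
      = (dA.modify (String.singleton t) 0 (· + w)).getD (String.singleton f) 0
        - (dA.modify (String.singleton t) 0 (· + w)).getD (String.singleton s) 0 := by
  simp only [PySem.Dict.getD_modify, pvSing_eq_iff]
  by_cases h1 : t = f
  · subst h1
    rw [if_pos rfl, if_pos rfl, if_neg (fun hh => hfs hh.symm), h]
    ring
  · by_cases h2 : t = s
    · subst h2
      rw [if_neg h1, if_pos rfl, if_neg (fun hh => h1 hh.symm), if_pos rfl, h]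
      ring
    · rw [if_neg h1, if_neg h2, if_neg (fun hh => h1 hh.symm), if_neg (fun hh => h2 hh.symm)]
      exact h

theorem pvGetD_modify_zero (d : PySem.Dict String Int) (k k' : String) :
    (d.modify k 0 (fun x => x)).getD k' 0 = d.getD k' 0 := by
  simp only [PySem.Dict.getD_modify]
  split_ifs with hh
  · rw [hh]
  · rfl

theorem pvStep_margin (f s : Char) (hfs : f ≠ s) (dA : PySem.Dict String Int)
    (m : Int) (q : String) (c : Int) (hc1 : -6 ≤ c) (hc2 : c ≤ 7)
    (h : m = dA.getD (String.singleton f) 0 - dA.getD (String.singleton s) 0) :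
    (if PySem.List.pyGetD ([3, 2, 1, 0, 1, 2, 3] : List Int) (c - 1) 0 = 0 then m
     else if (if c < 4 then PySem.List.pyGetD q.toList 0 ' '
              else PySem.List.pyGetD q.toList 1 ' ') = f then
       m + PySem.List.pyGetD ([3, 2, 1, 0, 1, 2, 3] : List Int) (c - 1) 0
     else if (if c < 4 then PySem.List.pyGetD q.toList 0 ' '
              else PySem.List.pyGetD q.toList 1 ' ') = s then
       m - PySem.List.pyGetD ([3, 2, 1, 0, 1, 2, 3] : List Int) (c - 1) 0
     else m)
      = (pvStepA dA q c).getD (String.singleton f) 0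
        - (pvStepA dA q c).getD (String.singleton s) 0 := by
  interval_cases c <;>
  · norm_num [pvStepA, PySem.List.pyGetD, PySem.List.pyGet?, PySem.List.pyIdx?]
    try simp only [show Int.toNat 0 = 0 from rfl, show Int.toNat 1 = 1 from rfl,
      show Int.toNat 2 = 2 from rfl, show Int.toNat 3 = 3 from rfl,
      show Int.toNat 4 = 4 from rfl, show Int.toNat 5 = 5 from rfl,
      show Int.toNat 6 = 6 from rfl, show Int.toNat 7 = 7 from rfl]
    try norm_num [show ([3, 2, 1, 0, 1, 2, 3] : List Int)[(0 : Nat)] = 3 from rfl,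
      show ([3, 2, 1, 0, 1, 2, 3] : List Int)[(1 : Nat)] = 2 from rfl,
      show ([3, 2, 1, 0, 1, 2, 3] : List Int)[(2 : Nat)] = 1 from rfl,
      show ([3, 2, 1, 0, 1, 2, 3] : List Int)[(3 : Nat)] = 0 from rfl,
      show ([3, 2, 1, 0, 1, 2, 3] : List Int)[(4 : Nat)] = 1 from rfl,
      show ([3, 2, 1, 0, 1, 2, 3] : List Int)[(5 : Nat)] = 2 from rfl,
      show ([3, 2, 1, 0, 1, 2, 3] : List Int)[(6 : Nat)] = 3 from rfl]
    first
      | exact h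
      | (simp only [pvGetD_modify_zero]; exact h)
      | exact pvModify_diff f s _ hfs dA m _ h

-- The whole fold: B's margin equals the difference of A's two tallies.
theorem pvMargin_eq_diff (ps : List (String × Int)) (f s : Char) (hfs : f ≠ s)
    (hps : ∀ p ∈ ps, -6 ≤ p.2 ∧ p.2 ≤ 7)
    (dA : PySem.Dict String Int) (m : Int)
    (h : m = dA.getD (String.singleton f) 0 - dA.getD (String.singleton s) 0) :
    ps.foldl (fun m qc =>
        let w : Int := PySem.List.pyGetD ([3, 2, 1, 0, 1, 2, 3] : List Int) (qc.2 - 1) 0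
        if w = 0 then m
        else
          let target : Char :=
            if qc.2 < 4 then PySem.List.pyGetD qc.1.toList 0 ' '
            else PySem.List.pyGetD qc.1.toList 1 ' '
          if target = f then m + w else if target = s then m - w else m) m
      = (ps.foldl (fun d p => pvStepA d p.1 p.2) dA).getD (String.singleton f) 0
        - (ps.foldl (fun d p => pvStepA d p.1 p.2) dA).getD (String.singleton s) 0 := by
  induction ps generalizing dA m with
  | nil => exact h
  | cons p ps ih =>
    simp only [List.foldl_cons]
    have hp := hps p List.mem_cons_self
    exact ih (fun r hr => hps r (List.mem_cons_of_mem _ hr)) _ _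
      (pvStep_margin f s hfs dA m p.1 p.2 hp.1 hp.2 h)

-- ===== VERDICT (by name: the statement is the Claim_ definition above) =====
theorem solution_spec : Claim_equal_solution := by
  intro survey choices _hdom hpre
  obtain ⟨hlen, hzip⟩ := hpre
  unfold Spec_solution solution solution_alt pvMargin
  rw [pvBodyA_eq,
      pv_foldl_idx_zip_zero (fun s q c => pvStepA s q c) "" 0 survey choices hlen]
  have hbound : ∀ p ∈ survey.zip choices, -6 ≤ p.2 ∧ p.2 ≤ 7 :=
    fun p hp => ⟨(hzip p hp).1, (hzip p hp).2.1⟩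
  simp only [List.map_cons, List.map_nil]
  rw [pvMargin_eq_diff (survey.zip choices) 'R' 'T' (by decide) hbound _ 0
        (by rw [pvInit_getD, pvInit_getD]; ring),
      pvMargin_eq_diff (survey.zip choices) 'C' 'F' (by decide) hbound _ 0
        (by rw [pvInit_getD, pvInit_getD]; ring),
      pvMargin_eq_diff (survey.zip choices) 'J' 'M' (by decide) hbound _ 0
        (by rw [pvInit_getD, pvInit_getD]; ring),
      pvMargin_eq_diff (survey.zip choices) 'A' 'N' (by decide) hbound _ 0
        (by rw [pvInit_getD, pvInit_getD]; ring)]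
  simp only [ge_iff_le, sub_nonneg,
    show String.singleton 'R' = "R" from rfl, show String.singleton 'T' = "T" from rfl,
    show String.singleton 'C' = "C" from rfl, show String.singleton 'F' = "F" from rfl,
    show String.singleton 'J' = "J" from rfl, show String.singleton 'M' = "M" from rfl,
    show String.singleton 'A' = "A" from rfl, show String.singleton 'N' = "N" from rfl]
  split_ifs <;> decide
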